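-- pv_equiv track=rewrite | github.com/coolinar/pythonProjectTgBotCrNews | main.py | suggest_currencies
-- ===== SOURCE A (Python) =====
-- def suggest_currencies(input_str, currency_dict):
--     # Список приоритетных криптовалют
--     prioritized = ['bitcoin', 'ethereum', 'tether', 'usd-coin', 'solana', 'cardano', 'polkadot', 'ripple', 'dogecoin', 'toncoin', 'mantle']
--
--     # Прямое совпадение по имени
--     exact_matches = [k for k in currency_dict.keys() if k == input_str.lower()]
--
--     # Совпадение по начальным символам
--     startswith_matches = [k for k in currency_dict.keys() if k.startswith(input_str.lower()) and k not in exact_matches]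
--
--     # Частичные совпадения, где строка содержится внутри названия валюты
--     partial_matches = [k for k in currency_dict.keys() if input_str.lower() in k and k not in startswith_matches and k not in exact_matches]
--
--     # Сортируем: сначала приоритетные криптовалюты
--     sorted_matches = sorted(exact_matches + startswith_matches + partial_matches, key=lambda x: (x not in prioritized, x))
--
--     # Ограничиваем список до 5 элементов и включаем приоритетные
--     suggestions = sorted([s for s in sorted_matches if s in prioritized] + sorted_matches[:5], key=lambda x: x not in prioritized)
--
--     return suggestions[:5]
-- ===== SOURCE B (Python) =====
-- def suggest_currencies(input_str, currency_dict):
--     # Single pass partitioning the matching keys into prioritized / other,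
--     # then alphabetical order inside each group, prioritized group first.
--     prioritized = {'bitcoin', 'ethereum', 'tether', 'usd-coin', 'solana', 'cardano',
--                    'polkadot', 'ripple', 'dogecoin', 'toncoin', 'mantle'}
--     s = input_str.lower()
--     pri = []
--     rest = []
--     for k in currency_dict:
--         if s in k:
--             if k in prioritized:
--                 pri.append(k)
--             else:
--                 rest.append(k)
--     pri.sort()
--     rest.sort()
--     return (pri + rest)[:5]
-- ===== Notes on version B (the rewrite author's own statement) =====
-- stated objective: faster
-- what changed: One partitioning pass over the keys plus two plain sorts and a truncation replace A's three comprehensions with inner list-membership scans, tuple-key sort, re-filter and second stable sort; B also drops A's duplication of prioritized matches (see differs).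
-- intended difference: On inputs where between 1 and 4 distinct dict keys both contain input_str.lower() and are prioritized currencies, A re-appends the prioritized matches to the already complete list and returns each such match twice (e.g. ['bitcoin','bitcoin','bitcute']); B lists each suggestion once, which is what a suggestion list is meant to do. — e.g. on suggest_currencies("bit", [("bitcoin", "a"), ("bitcute", "b")]): A returns ["bitcoin", "bitcoin", "bitcute"], B returns ["bitcoin", "bitcute"]
import Mathlib
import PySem

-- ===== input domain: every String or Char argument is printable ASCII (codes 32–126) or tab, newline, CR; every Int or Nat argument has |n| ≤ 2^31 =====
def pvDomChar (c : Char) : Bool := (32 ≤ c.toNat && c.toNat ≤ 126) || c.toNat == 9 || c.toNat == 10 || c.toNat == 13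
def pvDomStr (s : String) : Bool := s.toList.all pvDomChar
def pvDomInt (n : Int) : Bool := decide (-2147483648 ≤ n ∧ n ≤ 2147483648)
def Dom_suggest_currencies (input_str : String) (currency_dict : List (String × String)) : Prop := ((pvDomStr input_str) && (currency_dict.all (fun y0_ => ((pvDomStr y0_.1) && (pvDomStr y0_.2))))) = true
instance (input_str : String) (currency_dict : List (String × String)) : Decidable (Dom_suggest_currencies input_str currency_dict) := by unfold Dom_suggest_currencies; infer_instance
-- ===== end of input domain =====

-- B replaces A's three comprehensions (each with inner list-membership scans), tuple-key sort,
-- re-filter and second stable sort by one partitioning pass plus two plain sorts and a truncation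
-- (objective: faster, measured); on the D_ inputs below B intentionally does
-- not repeat prioritized matches.

-- the prioritized-currency literal list of the Python source (shared literal, used by both ports and D_)
def pvPrioritized : List String :=
  ["bitcoin", "ethereum", "tether", "usd-coin", "solana", "cardano", "polkadot",
   "ripple", "dogecoin", "toncoin", "mantle"]

-- ===== PORT A =====
-- dict iteration/keys(): first-occurrence order of the association list's keys (PySem.List.dedup)
def suggest_currencies (input_str : String) (currency_dict : List (String × String)) : List String :=
  let prioritized := pvPrioritized
  let s := PySem.Str.lower input_str
  let keys := PySem.List.dedup (currency_dict.map (fun y => y.1))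
  let exact_matches := keys.filter (fun k => k == s)
  let startswith_matches := keys.filter (fun k => PySem.Str.startswith k s && !exact_matches.contains k)
  let partial_matches := keys.filter (fun k =>
    PySem.Str.isIn s k && !startswith_matches.contains k && !exact_matches.contains k)
  let sorted_matches := PySem.List.sorted2 (exact_matches ++ startswith_matches ++ partial_matches)
    (fun x => !prioritized.contains x) (fun x => x)
  let suggestions := PySem.List.sorted
    (sorted_matches.filter (fun x => prioritized.contains x) ++ PySem.List.slice sorted_matches none (some 5))
    (fun x => !prioritized.contains x)
  PySem.List.slice suggestions none (some 5)

-- ===== PORT B =====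
def suggest_currencies_alt (input_str : String) (currency_dict : List (String × String)) : List String :=
  let prioritized : PySem.Set String := PySem.Set.ofList pvPrioritized
  let s := PySem.Str.lower input_str
  let pr := (PySem.List.dedup (currency_dict.map (fun y => y.1))).foldl
    (fun (acc : List String × List String) k =>
      if PySem.Str.isIn s k then
        if PySem.Set.contains prioritized k then (acc.1 ++ [k], acc.2) else (acc.1, acc.2 ++ [k])
      else acc) ([], [])
  let pri := PySem.List.sorted pr.1 (fun x => x)
  let rest := PySem.List.sorted pr.2 (fun x => x)
  PySem.List.slice (pri ++ rest) none (some 5)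

-- ===== PRECONDITION & SPEC =====
-- On inputs where between 1 and 4 distinct dict keys both contain input_str.lower() and are
-- prioritized currencies, A re-appends the prioritized matches to the already complete list and
-- returns each such match twice (e.g. ['bitcoin','bitcoin','bitcute']); B lists each suggestion
-- once, which is what a suggestion list is meant to do.
def D_suggest_currencies (input_str : String) (currency_dict : List (String × String)) : Prop :=
  let p := ((PySem.List.dedup (currency_dict.map (fun y => y.1))).filter
    (fun k => PySem.Str.isIn (PySem.Str.lower input_str) k && pvPrioritized.contains k)).length
  1 ≤ p ∧ p < 5
instance (input_str : String) (currency_dict : List (String × String)) : Decidable (D_suggest_currencies input_str currency_dict) := by unfold D_suggest_currencies; infer_instance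

def Spec_suggest_currencies (input_str : String) (currency_dict : List (String × String)) (out : List String) : Prop := ¬ D_suggest_currencies input_str currency_dict → out = suggest_currencies_alt input_str currency_dict
instance (input_str : String) (currency_dict : List (String × String)) (out : List String) : Decidable (Spec_suggest_currencies input_str currency_dict out) := by unfold Spec_suggest_currencies; infer_instance

def pvDiffWitness_suggest_currencies : String × (List (String × String)) :=
  ("bit", [("bitcoin", "a"), ("bitcute", "b")])
def pvDiffWitnessOut_suggest_currencies : (List String) × (List String) :=
  (["bitcoin", "bitcoin", "bitcute"], ["bitcoin", "bitcute"])

-- ===== CLAIM (what is proved, stated in full; the proofs are below) =====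
def Claim_unchanged_suggest_currencies : Prop := ∀ (input_str : String) (currency_dict : List (String × String)), Dom_suggest_currencies input_str currency_dict → Spec_suggest_currencies input_str currency_dict (suggest_currencies input_str currency_dict)
def Claim_changed_suggest_currencies : Prop := Dom_suggest_currencies (pvDiffWitness_suggest_currencies.1) (pvDiffWitness_suggest_currencies.2) ∧ D_suggest_currencies (pvDiffWitness_suggest_currencies.1) (pvDiffWitness_suggest_currencies.2) ∧ suggest_currencies (pvDiffWitness_suggest_currencies.1) (pvDiffWitness_suggest_currencies.2) = pvDiffWitnessOut_suggest_currencies.1 ∧ suggest_currencies_alt (pvDiffWitness_suggest_currencies.1) (pvDiffWitness_suggest_currencies.2) = pvDiffWitnessOut_suggest_currencies.2 ∧ pvDiffWitnessOut_suggest_currencies.1 ≠ pvDiffWitnessOut_suggest_currencies.2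
def Claim_exact_suggest_currencies : Prop := ∀ (input_str : String) (currency_dict : List (String × String)), Dom_suggest_currencies input_str currency_dict → D_suggest_currencies input_str currency_dict → suggest_currencies input_str currency_dict ≠ suggest_currencies_alt input_str currency_dict

-- ===== LEMMAS AND PROOFS =====

-- proof-only abbreviations for the common intermediate lists
def pvKeys (currency_dict : List (String × String)) : List String :=
  PySem.List.dedup (currency_dict.map (fun y => y.1))
def pvP (input_str : String) (currency_dict : List (String × String)) : List String :=
  PySem.List.sorted ((pvKeys currency_dict).filter
    (fun k => PySem.Str.isIn (PySem.Str.lower input_str) k && pvPrioritized.contains k)) (fun x => x)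
def pvO (input_str : String) (currency_dict : List (String × String)) : List String :=
  PySem.List.sorted ((pvKeys currency_dict).filter
    (fun k => PySem.Str.isIn (PySem.Str.lower input_str) k && !pvPrioritized.contains k)) (fun x => x)

theorem set_ofList_prior : PySem.Set.ofList pvPrioritized = pvPrioritized := by decide

theorem alt_closed (input_str : String) (currency_dict : List (String × String)) :
    suggest_currencies_alt input_str currency_dict
      = (pvP input_str currency_dict ++ pvO input_str currency_dict).take 5 := by
  have hfun : (fun (acc : List String × List String) k =>
      if PySem.Str.isIn (PySem.Str.lower input_str) k then
        if PySem.Set.contains (PySem.Set.ofList pvPrioritized) k then (acc.1 ++ [k], acc.2) else (acc.1, acc.2 ++ [k])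
      else acc)
    = (fun (acc : List String × List String) k =>
      ((fun a k => if PySem.Str.isIn (PySem.Str.lower input_str) k && pvPrioritized.contains k then a ++ [k] else a) acc.1 k,
       (fun a k => if PySem.Str.isIn (PySem.Str.lower input_str) k && !pvPrioritized.contains k then a ++ [k] else a) acc.2 k)) := by
    funext acc k
    rw [set_ofList_prior]
    show _ = (_, _)
    cases h1 : PySem.Str.isIn (PySem.Str.lower input_str) k <;>
      cases h2 : pvPrioritized.contains k <;>
        simp only [PySem.Set.contains, h1, h2, Bool.and_false, Bool.and_true, Bool.true_and,
          Bool.false_and, Bool.not_true, Bool.not_false, if_true, if_false, Bool.false_eq_true,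
          ite_false, ite_true]
  simp only [suggest_currencies_alt]
  rw [hfun, PySem.List.foldl_prod_mk
      (f := fun a k => if PySem.Str.isIn (PySem.Str.lower input_str) k && pvPrioritized.contains k then a ++ [k] else a)
      (g := fun a k => if PySem.Str.isIn (PySem.Str.lower input_str) k && !pvPrioritized.contains k then a ++ [k] else a),
    PySem.List.foldl_append_if_eq_filter, PySem.List.foldl_append_if_eq_filter]
  simp only [fun xs => PySem.List.slice_to xs (b := 5) (by norm_num : (0:ℤ) ≤ 5), show Int.toNat 5 = 5 from rfl,
    List.nil_append]
  rfl

theorem sorted2_eq_sorted_lex {α : Type} (xs : List α) (k1 : α → Bool) (k2 : α → String) :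
    PySem.List.sorted2 xs k1 k2
      = PySem.List.sorted xs (fun x => toLex (k1 x, k2 x)) := by
  show List.foldl _ [] xs = List.foldl _ [] xs
  congr 1
  funext acc x
  congr 1
  funext a b
  show (decide (k1 a < k1 b) || (!decide (k1 b < k1 a) && decide (k2 a < k2 b)))
      = decide (toLex (k1 a, k2 a) < toLex (k1 b, k2 b))
  cases h1 : k1 a <;> cases h2 : k1 b <;>
    simp [Prod.Lex.lt_iff, decide_eq_decide]

theorem count_filter_neg {α : Type} [BEq α] [LawfulBEq α] {p : α → Bool} {a : α} {l : List α}
    (h : p a = false) : (l.filter p).count a = 0 := by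
  rw [List.count_eq_zero]
  intro hmem
  rw [List.mem_filter, h] at hmem
  exact absurd hmem.2 (by simp)

theorem count_filter_eq {α : Type} [BEq α] [LawfulBEq α] (p : α → Bool) (a : α) (l : List α) :
    (l.filter p).count a = if p a then l.count a else 0 := by
  cases h : p a
  · simp [count_filter_neg h]
  · simp [List.count_filter h]

theorem filter_tri_perm {α : Type} [BEq α] [LawfulBEq α] (l : List α)
    (e w m : α → Bool) (hew : ∀ x, e x = true → w x = true) (hwm : ∀ x, w x = true → m x = true) :
    (l.filter e ++ l.filter (fun x => w x && !e x) ++ l.filter (fun x => m x && !w x)).Perm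
      (l.filter m) := by
  rw [List.perm_iff_count]
  intro a
  simp only [List.count_append]
  cases he : e a <;> cases hw : w a <;> cases hm : m a <;>
    simp only [count_filter_eq, he, hw, hm, Bool.and_true, Bool.and_false, Bool.not_true,
      Bool.not_false, Bool.true_and, Bool.false_and, if_true, if_false, ite_true, ite_false,
      Bool.false_eq_true, Bool.true_eq_false] <;>
    first
      | omega
      | (exact absurd (hwm _ hw) (by simp [hm]))
      | (exact absurd (hew _ he) (by simp [hw]))

theorem insertBy_boolkey {α : Type} (bk : α → Bool) (x : α) (F T : List α)
    (hF : ∀ y ∈ F, bk y = false) (hT : ∀ y ∈ T, bk y = true) :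
    PySem.List.insertBy (fun a b => decide (bk a < bk b)) x (F ++ T)
      = if bk x then (F ++ T) ++ [x] else F ++ x :: T := by
  cases hx : bk x
  · simp only [Bool.false_eq_true, if_false]
    induction F with
    | nil =>
      cases T with
      | nil => simp [PySem.List.insertBy]
      | cons y ys =>
        have hy := hT y (by simp)
        simp [PySem.List.insertBy, hx, hy]
    | cons f F ih =>
      have hf := hF f (by simp)
      simp only [List.cons_append, PySem.List.insertBy, hx, hf]
      simp only [show decide ((false:Bool) < false) = false from rfl, Bool.false_eq_true, if_false]
      rw [ih (fun y hy => hF y (by simp [hy]))]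
  · simp only [if_true]
    rw [PySem.List.insertBy_of_forall_not_before _ _ _
      (fun y _ => by rw [hx]; cases bk y <;> rfl)]

theorem foldl_insertBy_boolkey {α : Type} (bk : α → Bool) :
    ∀ (xs F T : List α), (∀ y ∈ F, bk y = false) → (∀ y ∈ T, bk y = true) →
    xs.foldl (fun acc x => PySem.List.insertBy (fun a b => decide (bk a < bk b)) x acc) (F ++ T)
      = (F ++ xs.filter (fun x => !bk x)) ++ (T ++ xs.filter bk)
  | [], F, T, hF, hT => by simp
  | x :: xs, F, T, hF, hT => by
    simp only [List.foldl_cons]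
    rw [insertBy_boolkey bk x F T hF hT]
    cases hx : bk x
    · simp only [Bool.false_eq_true, if_false]
      have : F ++ x :: T = (F ++ [x]) ++ T := by simp
      rw [this, foldl_insertBy_boolkey bk xs (F ++ [x]) T
        (by intro y hy; rcases List.mem_append.mp hy with h | h
            · exact hF y h
            · simp at h; subst h; exact hx) hT]
      simp [hx]
    · simp only [if_true]
      rw [List.append_assoc, foldl_insertBy_boolkey bk xs F (T ++ [x]) hF
        (by intro y hy; rcases List.mem_append.mp hy with h | h
            · exact hT y h
            · simp at h; subst h; exact hx)]
      simp [hx]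

theorem sorted_boolkey {α : Type} (bk : α → Bool) (xs : List α) :
    PySem.List.sorted xs bk = xs.filter (fun x => !bk x) ++ xs.filter bk := by
  have h := foldl_insertBy_boolkey bk xs [] [] (by simp) (by simp)
  simpa using h

theorem sorted_lexkey_eq (c : String → Bool) (M : List String) (hM : M.Nodup) :
    PySem.List.sorted M (fun x => toLex (!c x, x))
      = PySem.List.sorted (M.filter c) (fun x => x)
        ++ PySem.List.sorted (M.filter (fun x => !c x)) (fun x => x) := by
  have hperm : (PySem.List.sorted (M.filter c) (fun x => x)
      ++ PySem.List.sorted (M.filter (fun x => !c x)) (fun x => x)).Perm M :=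
    ((PySem.List.sorted_perm _ _ _).append (PySem.List.sorted_perm _ _ _)).trans
      (List.filter_append_perm c M)
  apply PySem.List.sorted_eq_of_perm_of_pairwise_lt _ _ _ hperm
  have hstrict : ∀ (p : String → Bool),
      (PySem.List.sorted (M.filter p) (fun x => x)).Pairwise (· < ·) := by
    intro p
    have hle := PySem.List.sorted_pairwise (M.filter p) (fun x => x)
    have hnd : (PySem.List.sorted (M.filter p) (fun x => x)).Nodup :=
      ((PySem.List.sorted_perm (M.filter p) (fun x => x) false).nodup_iff).mpr (hM.filter p)
    exact (hle.and hnd).imp (fun h => lt_of_le_of_ne h.1 h.2)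
  have hmemP : ∀ x ∈ PySem.List.sorted (M.filter c) (fun x => x), c x = true := by
    intro x hx
    exact (List.mem_filter.mp ((PySem.List.mem_sorted _ _ _ _).mp hx)).2
  have hmemO : ∀ x ∈ PySem.List.sorted (M.filter (fun x => !c x)) (fun x => x), c x = false := by
    intro x hx
    have := (List.mem_filter.mp ((PySem.List.mem_sorted _ _ _ _).mp hx)).2
    simpa using this
  rw [List.pairwise_append]
  refine ⟨?_, ?_, ?_⟩
  · exact List.Pairwise.imp_of_mem
      (fun ha hb hab => by
        rw [Prod.Lex.lt_iff]
        right
        exact ⟨by rw [hmemP _ ha, hmemP _ hb]; rfl, hab⟩)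
      (hstrict c)
  · exact List.Pairwise.imp_of_mem
      (fun ha hb hab => by
        rw [Prod.Lex.lt_iff]
        right
        exact ⟨by rw [hmemO _ ha, hmemO _ hb]; rfl, hab⟩)
      (hstrict (fun x => !c x))
  · intro a ha b hb
    rw [Prod.Lex.lt_iff]
    left
    rw [hmemP a ha, hmemO b hb]
    exact Bool.false_lt_true

theorem filter_contains_eq {l : List String} {p : String → Bool} {k : String} (hk : k ∈ l) :
    (l.filter p).contains k = p k := by
  cases h : p k
  · have : k ∉ l.filter p := fun hm => by
      rw [List.mem_filter, h] at hm
      exact absurd hm.2 (by simp)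
    simp [this]
  · have : k ∈ l.filter p := List.mem_filter.mpr ⟨hk, h⟩
    simp [this]

theorem a_closed (input_str : String) (currency_dict : List (String × String)) :
    suggest_currencies input_str currency_dict
      = (pvP input_str currency_dict ++ (pvP input_str currency_dict).take 5
          ++ (pvO input_str currency_dict).take (5 - (pvP input_str currency_dict).length)).take 5 := by
  simp only [suggest_currencies]
  generalize hs : PySem.Str.lower input_str = s
  have hkeys : PySem.List.dedup (List.map (fun y => y.1) currency_dict) = pvKeys currency_dict := rfl
  rw [hkeys]
  set keys := pvKeys currency_dict with hk
  have hnd : keys.Nodup := PySem.List.nodup_dedup _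
  -- implications between the three match predicates
  have hew : ∀ x : String, (x == s) = true → PySem.Str.startswith x s = true := by
    intro x hx
    have : x = s := by simpa using hx
    subst this
    rw [PySem.Str.startswith_eq]
    simp [PySem.Chars.startswith]
  have hwm : ∀ x : String, PySem.Str.startswith x s = true → PySem.Str.isIn s x = true := by
    intro x hx
    rw [PySem.Str.isIn_iff_infix]
    rw [PySem.Str.startswith_eq] at hx
    simp [PySem.Chars.startswith] at hx
    exact hx.isInfix
  -- normalize the startswith filter
  have hstart : keys.filter (fun k => PySem.Str.startswith k s
        && !(keys.filter (fun k => k == s)).contains k)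
      = keys.filter (fun k => PySem.Str.startswith k s && !(k == s)) :=
    List.filter_congr (fun k hk => by rw [filter_contains_eq hk])
  rw [hstart]
  -- normalize the partial filter
  have hpart : keys.filter (fun k => PySem.Str.isIn s k
        && !(keys.filter (fun k => PySem.Str.startswith k s && !(k == s))).contains k
        && !(keys.filter (fun k => k == s)).contains k)
      = keys.filter (fun k => PySem.Str.isIn s k && !PySem.Str.startswith k s) := by
    apply List.filter_congr
    intro k hk
    rw [filter_contains_eq hk, filter_contains_eq hk]
    cases he : (k == s) <;> cases hw : PySem.Str.startswith k s
    · simp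
    · simp
    · have hc := hew k he
      rw [hw] at hc
      exact absurd hc (by simp)
    · simp
  rw [hpart]
  -- the three comprehensions together are the 'contains' filter
  have htri := filter_tri_perm keys (fun k => k == s) (fun k => PySem.Str.startswith k s)
    (fun k => PySem.Str.isIn s k) hew hwm
  rw [sorted2_eq_sorted_lex]
  rw [PySem.List.sorted_eq_sorted_of_perm _ (keys.filter (fun k => PySem.Str.isIn s k)) _
    (fun a b hab => by
      have := congrArg (fun z => (ofLex z).2) hab
      simpa using this)
    htri]
  rw [sorted_lexkey_eq (fun x => pvPrioritized.contains x) _ (hnd.filter _)]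
  rw [List.filter_filter, List.filter_filter]
  rw [List.filter_congr (l := keys)
        (q := fun a => PySem.Str.isIn s a && pvPrioritized.contains a)
        (fun a _ => Bool.and_comm _ _),
      List.filter_congr (l := keys)
        (q := fun a => PySem.Str.isIn s a && !pvPrioritized.contains a)
        (fun a _ => Bool.and_comm _ _)]
  -- now the two sorted blocks are pvP and pvO
  have hP : PySem.List.sorted (keys.filter
        (fun a => PySem.Str.isIn s a && pvPrioritized.contains a)) (fun x => x)
      = pvP input_str currency_dict := by rw [pvP, ← hs, hk]
  have hO : PySem.List.sorted (keys.filter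
        (fun a => PySem.Str.isIn s a && !pvPrioritized.contains a)) (fun x => x)
      = pvO input_str currency_dict := by rw [pvO, ← hs, hk]
  rw [hP, hO]
  set P := pvP input_str currency_dict with hPd
  set O := pvO input_str currency_dict with hOd
  have hmemP : ∀ x ∈ P, pvPrioritized.contains x = true := by
    intro x hx
    rw [hPd, pvP] at hx
    exact (Bool.and_elim_right (List.mem_filter.mp ((PySem.List.mem_sorted _ _ _ _).mp hx)).2)
  have hmemO : ∀ x ∈ O, pvPrioritized.contains x = false := by
    intro x hx
    rw [hOd, pvO] at hx
    have := (Bool.and_elim_right (List.mem_filter.mp ((PySem.List.mem_sorted _ _ _ _).mp hx)).2)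
    simpa using this
  -- first slice
  rw [show PySem.List.slice (P ++ O) none (some 5) = (P ++ O).take 5 from by
    rw [PySem.List.slice_to (P ++ O) (b := 5) (by norm_num)]; rfl]
  rw [List.take_append]
  -- filter of the already sorted list
  rw [List.filter_append]
  rw [List.filter_eq_self.mpr (fun a ha => hmemP a ha),
    List.filter_eq_nil_iff.mpr (fun a ha => by simpa using hmemO a ha),
    List.append_nil]
  -- second sort is a stable partition by the boolean key
  rw [sorted_boolkey]
  rw [List.filter_append, List.filter_append, List.filter_append, List.filter_append]
  rw [List.filter_eq_self.mpr (fun a ha => by simpa using hmemP a ha),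
    List.filter_eq_self.mpr (fun a ha => by simpa using hmemP a (List.mem_of_mem_take ha)),
    List.filter_eq_nil_iff.mpr (fun a ha => by simpa using hmemO a (List.mem_of_mem_take ha)),
    List.filter_eq_nil_iff.mpr (fun a ha => by simpa using hmemP a ha),
    List.filter_eq_nil_iff.mpr (fun a ha => by simpa using hmemP a (List.mem_of_mem_take ha)),
    List.filter_eq_self.mpr (fun a ha => by simpa using hmemO a (List.mem_of_mem_take ha))]
  -- final slice
  rw [show ∀ xs : List String, PySem.List.slice xs none (some 5) = xs.take 5 from fun xs => by
    rw [PySem.List.slice_to xs (b := 5) (by norm_num)]; rfl]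
  simp

theorem final_take (P O : List String) (h : P.length = 0 ∨ 5 ≤ P.length) :
    (P ++ P.take 5 ++ O.take (5 - P.length)).take 5 = (P ++ O).take 5 := by
  rcases h with h | h
  · rw [List.length_eq_zero_iff.mp h]
    simp
  · rw [List.take_append_of_le_length (by simp; omega),
      List.take_append_of_le_length h, List.take_append_of_le_length h]

theorem tight_ne (P O : List String) (hPm : ∀ x ∈ P, pvPrioritized.contains x = true)
    (hOm : ∀ x ∈ O, pvPrioritized.contains x = false)
    (hp1 : 1 ≤ P.length) (hp5 : P.length < 5) :
    (P ++ P.take 5 ++ O.take (5 - P.length)).take 5 ≠ (P ++ O).take 5 := by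
  intro heq
  cases O with
  | nil =>
    have := congrArg List.length heq
    simp only [List.length_take, List.length_append, List.take_nil, List.length_nil] at this
    omega
  | cons o O' =>
    have h0 : ∃ y, P[0]? = some y := by
      cases P with
      | nil => simp at hp1
      | cons a t => exact ⟨a, rfl⟩
    obtain ⟨y, hy⟩ := h0
    have hyP : y ∈ P := List.mem_of_getElem? hy
    have hA : ((P ++ P.take 5 ++ (o :: O').take (5 - P.length)).take 5)[P.length]?
        = some y := by
      rw [List.getElem?_take, if_pos hp5, List.append_assoc,
        List.getElem?_append_right (le_refl P.length), Nat.sub_self,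
        List.getElem?_append_left (by simp; omega), List.getElem?_take, if_pos (by omega)]
      exact hy
    have hB : ((P ++ o :: O').take 5)[P.length]? = some o := by
      rw [List.getElem?_take, if_pos hp5,
        List.getElem?_append_right (le_refl P.length), Nat.sub_self]
      rfl
    rw [heq, hB] at hA
    have hoy : o = y := Option.some_inj.mp hA
    subst hoy
    have : pvPrioritized.contains o = true := hPm _ hyP
    rw [hOm o (by simp)] at this
    cases this

theorem pvP_mem (input_str : String) (currency_dict : List (String × String)) :
    ∀ x ∈ pvP input_str currency_dict, pvPrioritized.contains x = true := by
  intro x hx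
  rw [pvP] at hx
  exact Bool.and_elim_right (List.mem_filter.mp ((PySem.List.mem_sorted _ _ _ _).mp hx)).2

theorem pvO_mem (input_str : String) (currency_dict : List (String × String)) :
    ∀ x ∈ pvO input_str currency_dict, pvPrioritized.contains x = false := by
  intro x hx
  rw [pvO] at hx
  have := Bool.and_elim_right (List.mem_filter.mp ((PySem.List.mem_sorted _ _ _ _).mp hx)).2
  simpa using this

theorem d_count_eq (input_str : String) (currency_dict : List (String × String)) :
    ((PySem.List.dedup (currency_dict.map (fun y => y.1))).filter
      (fun k => PySem.Str.isIn (PySem.Str.lower input_str) k && pvPrioritized.contains k)).length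
      = (pvP input_str currency_dict).length := by
  rw [pvP, PySem.List.length_sorted]
  rfl

-- ===== VERDICT (by name: the statement is the Claim_ definition above) =====
theorem suggest_currencies_spec : Claim_unchanged_suggest_currencies := by
  intro input_str currency_dict _ hnD
  rw [a_closed, alt_closed]
  apply final_take
  rw [D_suggest_currencies, d_count_eq] at hnD
  omega

theorem suggest_currencies_changed : Claim_changed_suggest_currencies := by
  unfold Claim_changed_suggest_currencies; decide

theorem suggest_currencies_tight : Claim_exact_suggest_currencies := by
  intro input_str currency_dict _ hD
  rw [a_closed, alt_closed]
  rw [D_suggest_currencies, d_count_eq] at hD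
  exact tight_ne _ _ (pvP_mem input_str currency_dict) (pvO_mem input_str currency_dict)
    (by omega) (by omega)
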